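-- pv_equiv track=rewrite | github.com/hoffmann-topos-lab/PythonDeInterpreter | NativeDisasm/arm_thumb_disasm.py | _it_suffix
-- ===== SOURCE A (Python) =====
-- def _it_suffix(cond: int, mask: int) -> str:
--     """Gera sufixo T/E para bloco IT."""
--     base = cond & 1
--     s = ""
--     for bit in [3, 2, 1]:
--         if mask & (1 << bit):
--             break
--         if mask & (1 << (bit - 1)):
--             s += "t" if ((mask >> (bit - 1)) & 1) == base else "e"
--     return s
-- ===== SOURCE B (Python) =====
-- def _it_suffix(cond: int, mask: int) -> str:
--     """Gera sufixo T/E para bloco IT (closed form, no loop)."""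
--     if (mask & 8) == 0 and (mask & 7) != 0:
--         return "t" if (cond & 1) else "e"
--     return ""
-- ===== Notes on version B (the rewrite author's own statement) =====
-- stated objective: simpler
-- what changed: Replaced the break-controlled loop over bits 3..1 (which can append at most one character, always 't' iff cond is odd) by a closed-form two-condition return using mask&8 and mask&7.
import Mathlib
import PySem

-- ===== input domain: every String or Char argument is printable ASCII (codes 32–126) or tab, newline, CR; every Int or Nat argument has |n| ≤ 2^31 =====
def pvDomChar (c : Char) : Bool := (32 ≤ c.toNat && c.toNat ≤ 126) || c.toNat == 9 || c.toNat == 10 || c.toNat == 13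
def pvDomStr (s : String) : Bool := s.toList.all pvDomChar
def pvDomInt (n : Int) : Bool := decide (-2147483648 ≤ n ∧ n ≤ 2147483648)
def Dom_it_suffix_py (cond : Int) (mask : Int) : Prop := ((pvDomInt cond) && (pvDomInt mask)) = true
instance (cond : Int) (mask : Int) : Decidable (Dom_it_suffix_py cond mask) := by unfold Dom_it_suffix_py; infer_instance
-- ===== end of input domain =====

-- B replaces A's break-controlled loop (which appends at most one character) by a closed-form
-- two-condition return; equivalence is proved for all integer inputs (both functions are total).

-- ===== PORT A =====
-- the for-loop over [3, 2, 1]: 'break' returns the accumulator s unchanged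
def itLoopA (mask : Int) (base : Int) : List Nat → String → String
  | [], s => s
  | bit :: rest, s =>
    if PySem.Int.band mask ((1 : Int) <<< bit) ≠ 0 then s
    else if PySem.Int.band mask ((1 : Int) <<< (bit - 1)) ≠ 0 then
      itLoopA mask base rest
        (s ++ (if PySem.Int.band (mask >>> (bit - 1)) 1 = base then "t" else "e"))
    else itLoopA mask base rest s

def it_suffix_py (cond : Int) (mask : Int) : String :=
  itLoopA mask (PySem.Int.band cond 1) [3, 2, 1] ""

-- ===== PORT B =====
def it_suffix_py_alt (cond : Int) (mask : Int) : String :=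
  if PySem.Int.band mask 8 = 0 ∧ PySem.Int.band mask 7 ≠ 0 then
    (if PySem.Int.band cond 1 ≠ 0 then "t" else "e")
  else ""

-- ===== PRECONDITION & SPEC =====
def Spec_it_suffix_py (cond : Int) (mask : Int) (out : String) : Prop := out = it_suffix_py_alt cond mask
instance (cond : Int) (mask : Int) (out : String) : Decidable (Spec_it_suffix_py cond mask out) := by unfold Spec_it_suffix_py; infer_instance

-- ===== CLAIM (what is proved, stated in full; the proofs are below) =====
def Claim_equal_it_suffix_py : Prop := ∀ (cond : Int) (mask : Int), Dom_it_suffix_py cond mask → Spec_it_suffix_py cond mask (it_suffix_py cond mask)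

-- ===== LEMMAS AND PROOFS =====

-- band with a single power-of-two mask / a low-bits mask, in arithmetic (%-based) form
theorem pv_band8 (m : Int) : PySem.Int.band m 8 = m % 16 - m % 8 := by
  unfold PySem.Int.band
  split
  · rename_i h
    rw [if_pos (by norm_num : (0:Int) ≤ (8:Int))]
    rcases Int.eq_ofNat_of_zero_le h with ⟨n, rfl⟩
    simp only [Int.toNat_natCast]
    rw [show ((8:Int).toNat) = 2^3 from rfl, Nat.and_two_pow, Nat.testBit_eq_decide_div_mod_eq]
    by_cases hb : n / 8 % 2 = 1 <;> norm_num [hb] <;> omega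
  · rename_i h
    rw [if_pos (by norm_num : (0:Int) ≤ (8:Int))]
    rw [show ((8:Int).toNat) = 2^3 from rfl, Nat.and_comm, Nat.and_two_pow,
      Nat.testBit_eq_decide_div_mod_eq]
    set n := (-m-1).toNat with hn
    have hm : m = -((n:Int)+1) := by omega
    by_cases hb : n / 8 % 2 = 1 <;> norm_num [hb] <;> omega

theorem pv_band4 (m : Int) : PySem.Int.band m 4 = m % 8 - m % 4 := by
  unfold PySem.Int.band
  split
  · rename_i h
    rw [if_pos (by norm_num : (0:Int) ≤ (4:Int))]
    rcases Int.eq_ofNat_of_zero_le h with ⟨n, rfl⟩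
    simp only [Int.toNat_natCast]
    rw [show ((4:Int).toNat) = 2^2 from rfl, Nat.and_two_pow, Nat.testBit_eq_decide_div_mod_eq]
    by_cases hb : n / 4 % 2 = 1 <;> norm_num [hb] <;> omega
  · rename_i h
    rw [if_pos (by norm_num : (0:Int) ≤ (4:Int))]
    rw [show ((4:Int).toNat) = 2^2 from rfl, Nat.and_comm, Nat.and_two_pow,
      Nat.testBit_eq_decide_div_mod_eq]
    set n := (-m-1).toNat with hn
    have hm : m = -((n:Int)+1) := by omega
    by_cases hb : n / 4 % 2 = 1 <;> norm_num [hb] <;> omega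

theorem pv_band2 (m : Int) : PySem.Int.band m 2 = m % 4 - m % 2 := by
  unfold PySem.Int.band
  split
  · rename_i h
    rw [if_pos (by norm_num : (0:Int) ≤ (2:Int))]
    rcases Int.eq_ofNat_of_zero_le h with ⟨n, rfl⟩
    simp only [Int.toNat_natCast]
    rw [show ((2:Int).toNat) = 2^1 from rfl, Nat.and_two_pow, Nat.testBit_eq_decide_div_mod_eq]
    by_cases hb : n / 2 % 2 = 1 <;> norm_num [hb] <;> omega
  · rename_i h
    rw [if_pos (by norm_num : (0:Int) ≤ (2:Int))]
    rw [show ((2:Int).toNat) = 2^1 from rfl, Nat.and_comm, Nat.and_two_pow,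
      Nat.testBit_eq_decide_div_mod_eq]
    set n := (-m-1).toNat with hn
    have hm : m = -((n:Int)+1) := by omega
    by_cases hb : n / 2 % 2 = 1 <;> norm_num [hb] <;> omega

theorem pv_band1 (m : Int) : PySem.Int.band m 1 = m % 2 := by
  rw [PySem.Int.band_one]; simp [PySem.Int.mod, Int.fmod_eq_emod]

theorem pv_band7 (m : Int) : PySem.Int.band m 7 = m % 8 := by
  unfold PySem.Int.band
  split
  · rename_i h
    rw [if_pos (by norm_num : (0:Int) ≤ (7:Int))]
    rcases Int.eq_ofNat_of_zero_le h with ⟨n, rfl⟩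
    simp only [Int.toNat_natCast]
    rw [show ((7:Int).toNat) = 2^3 - 1 from rfl, Nat.and_two_pow_sub_one_eq_mod,
      show (2^3:Nat) = 8 from rfl]
    omega
  · rename_i h
    rw [if_pos (by norm_num : (0:Int) ≤ (7:Int))]
    rw [show ((7:Int).toNat) = 2^3 - 1 from rfl, Nat.and_comm, Nat.and_two_pow_sub_one_eq_mod,
      show (2^3:Nat) = 8 from rfl]
    set n := (-m-1).toNat with hn
    have hm : m = -((n:Int)+1) := by omega
    omega

theorem pv_shr1 (m : Int) : m >>> (1 : Nat) = m / 2 := by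
  rw [Int.shiftRight_eq_div_pow]; norm_num

theorem pv_shr2 (m : Int) : m >>> (2 : Nat) = m / 4 := by
  rw [Int.shiftRight_eq_div_pow]; norm_num

theorem pv_main (cond mask : Int) : it_suffix_py cond mask = it_suffix_py_alt cond mask := by
  unfold it_suffix_py it_suffix_py_alt
  simp only [itLoopA, show ((1:Int) <<< (3:Nat)) = 8 from by decide,
    show ((1:Int) <<< ((3:Nat) - 1)) = 4 from by decide,
    show ((1:Int) <<< ((2:Nat) - 1)) = 2 from by decide,
    show ((1:Int) <<< ((1:Nat) - 1)) = 1 from by decide,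
    show ((3:Nat) - 1) = 2 from rfl, show ((2:Nat) - 1) = 1 from rfl,
    show ((1:Nat) - 1) = 0 from rfl, Int.shiftRight_zero,
    pv_shr1, pv_shr2, pv_band8, pv_band7, pv_band4, pv_band2, pv_band1]
  split_ifs <;> first | rfl | omega

-- ===== VERDICT (by name: the statement is the Claim_ definition above) =====
theorem it_suffix_py_spec : Claim_equal_it_suffix_py := by
  intro cond mask _
  unfold Spec_it_suffix_py
  exact pv_main cond mask
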